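-- pv_equiv track=rewrite | github.com/bhattkirtan/code-terminator | backend/agents/validation_agent.py | _check_typescript_lint_issues
-- ===== SOURCE A (Python) =====
-- from typing import Dict, Any, List, Optional
--
-- def _check_typescript_lint_issues(content: str, file_path: str) -> List[str]:
--     """Check TypeScript specific lint issues"""
--     issues = []
--
--     # Check for unused variables (basic check)
--     lines = content.split('\n')
--     declared_vars = set()
--     used_vars = set()
--
--     for line in lines:
--         # Simple variable declaration detection
--         if ' let ' in line or ' const ' in line or ' var ' in line:
--             parts = line.split()
--             for i, part in enumerate(parts):
--                 if part in ['let', 'const', 'var'] and i + 1 < len(parts):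
--                     var_name = parts[i + 1].split('=')[0].split(':')[0].strip()
--                     declared_vars.add(var_name)
--
--         # Simple usage detection
--         for var in declared_vars:
--             if var in line and f' {var} ' in line or f'.{var}' in line or f'{var}(' in line:
--                 used_vars.add(var)
--
--     unused_vars = declared_vars - used_vars
--     for var in unused_vars:
--         issues.append(f"{file_path}: Unused variable '{var}'")
--
--     return issues
-- ===== SOURCE B (Python) =====
-- def _check_typescript_lint_issues(content: str, file_path: str) -> list:
--     """Two-pass rewrite: index first-declaration lines per variable, then scan
--     each variable's tail of the file once for a use."""
--     lines = content.split('\n')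
--
--     # Pass 1: first declaration line index per variable name (keep earliest).
--     first_decl = {}
--     for idx, line in enumerate(lines):
--         if ' let ' in line or ' const ' in line or ' var ' in line:
--             parts = line.split()
--             for i, part in enumerate(parts):
--                 if part in ['let', 'const', 'var'] and i + 1 < len(parts):
--                     name = parts[i + 1].split('=')[0].split(':')[0].strip()
--                     if name not in first_decl:
--                         first_decl[name] = idx
--
--     def _uses(var, line):
--         return (var in line and f' {var} ' in line) or f'.{var}' in line or f'{var}(' in line
--
--     # Pass 2: a variable counts as used iff some line at/after its first
--     # declaration matches the usage pattern.
--     used = set()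
--     for var, start in first_decl.items():
--         if any(_uses(var, line) for line in lines[start:]):
--             used.add(var)
--
--     unused = set(first_decl) - used
--     return [f"{file_path}: Unused variable '{var}'" for var in unused]
-- ===== Notes on version B (the rewrite author's own statement) =====
-- stated objective: alternative
-- what changed: Replaces A's single interleaved scan (per line, re-testing every variable declared so far) by two passes: a dict mapping each variable to its first declaration line index, then one per-variable scan of lines[first:] that stops at the first use; output is the same set of messages (list order is Python set-iteration order in both).
import Mathlib
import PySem

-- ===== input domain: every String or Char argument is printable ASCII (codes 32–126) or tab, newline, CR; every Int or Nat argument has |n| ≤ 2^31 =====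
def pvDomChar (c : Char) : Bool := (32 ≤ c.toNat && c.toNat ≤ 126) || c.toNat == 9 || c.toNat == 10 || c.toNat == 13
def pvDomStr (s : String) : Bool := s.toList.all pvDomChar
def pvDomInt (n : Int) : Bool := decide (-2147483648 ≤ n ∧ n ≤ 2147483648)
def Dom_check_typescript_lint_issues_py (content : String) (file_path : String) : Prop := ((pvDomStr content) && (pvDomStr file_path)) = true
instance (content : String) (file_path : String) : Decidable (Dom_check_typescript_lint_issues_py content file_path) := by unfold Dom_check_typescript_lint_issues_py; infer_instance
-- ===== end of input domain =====

-- B replaces A's interleaved line-by-line scan by two passes (first-declaration-index dict,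
-- then a per-variable scan of the line tail); same set of messages, alternative decomposition.


-- ===== PORT A =====
-- parts[i + 1].split('=')[0].split(':')[0].strip()
def pvA_varName (p : List Char) : List Char :=
  PySem.Chars.strip ((PySem.Chars.splitOn ((PySem.Chars.splitOn p ['=']).headD []) [':']).headD [])

-- body of A's inner 'for i, part in enumerate(parts)' loop
def pvA_declStep (parts : List (List Char)) (dv : PySem.Set (List Char)) (ip : Int × List Char) : PySem.Set (List Char) :=
  if ["let".toList, "const".toList, "var".toList].contains ip.2 && decide (ip.1 + 1 < (parts.length : Int)) then
    PySem.Set.add dv (pvA_varName (PySem.List.pyGetD parts (ip.1 + 1) []))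
  else dv

-- A's per-line declaration detection
def pvA_lineDecls (line : List Char) (dv : PySem.Set (List Char)) : PySem.Set (List Char) :=
  if PySem.Chars.isIn " let ".toList line || PySem.Chars.isIn " const ".toList line || PySem.Chars.isIn " var ".toList line then
    let parts := PySem.Chars.split₀ line
    (PySem.List.enumerate parts 0).foldl (pvA_declStep parts) dv
  else dv

-- A's per-line usage detection ('for var in declared_vars: …')
def pvA_lineUses (line : List Char) (dv uv : PySem.Set (List Char)) : PySem.Set (List Char) :=
  dv.foldl (fun uv v =>
    if (PySem.Chars.isIn v line && PySem.Chars.isIn (' ' :: (v ++ [' '])) line)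
        || PySem.Chars.isIn ('.' :: v) line || PySem.Chars.isIn (v ++ ['(']) line then
      PySem.Set.add uv v
    else uv) uv

def check_typescript_lint_issues_py (content : String) (file_path : String) : List String :=
  let lines := PySem.Chars.splitOn content.toList ['\n']
  let s := lines.foldl
    (fun (s : PySem.Set (List Char) × PySem.Set (List Char)) line =>
      let dv := pvA_lineDecls line s.1
      (dv, pvA_lineUses line dv s.2))
    (PySem.Set.empty, PySem.Set.empty)
  let unused := PySem.Set.diff s.1 s.2
  unused.foldl (fun issues v =>
    issues ++ [String.mk (file_path.toList ++ ": Unused variable '".toList ++ v ++ ['\''])]) []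

-- ===== PORT B =====
-- parts[i + 1].split('=')[0].split(':')[0].strip()
def pvB_varName (p : List Char) : List Char :=
  PySem.Chars.strip ((PySem.Chars.splitOn ((PySem.Chars.splitOn p ['=']).headD []) [':']).headD [])

-- pass 1, body of 'for idx, line in enumerate(lines)': record first declaration line index
def pvB_declLine (d : PySem.Dict (List Char) Int) (il : Int × List Char) : PySem.Dict (List Char) Int :=
  if PySem.Chars.isIn " let ".toList il.2 || PySem.Chars.isIn " const ".toList il.2 || PySem.Chars.isIn " var ".toList il.2 then
    let parts := PySem.Chars.split₀ il.2
    (PySem.List.enumerate parts 0).foldl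
      (fun d ip =>
        if ["let".toList, "const".toList, "var".toList].contains ip.2 && decide (ip.1 + 1 < (parts.length : Int)) then
          let n := pvB_varName (PySem.List.pyGetD parts (ip.1 + 1) [])
          if d.contains n then d else d.insert n il.1
        else d)
      d
  else d

-- _uses(var, line)
def pvB_uses (v line : List Char) : Bool :=
  (PySem.Chars.isIn v line && PySem.Chars.isIn (' ' :: (v ++ [' '])) line)
    || PySem.Chars.isIn ('.' :: v) line || PySem.Chars.isIn (v ++ ['(']) line

def check_typescript_lint_issues_py_alt (content : String) (file_path : String) : List String :=
  let lines := PySem.Chars.splitOn content.toList ['\n']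
  let d := (PySem.List.enumerate lines 0).foldl pvB_declLine PySem.Dict.empty
  let used := d.items.foldl
    (fun uv p => if (PySem.List.slice lines (some p.2) none).any (pvB_uses p.1) then PySem.Set.add uv p.1 else uv)
    PySem.Set.empty
  let unused := PySem.Set.diff d.keys used
  unused.map (fun v => String.mk (file_path.toList ++ ": Unused variable '".toList ++ v ++ ['\'']))

-- ===== PRECONDITION & SPEC =====
def Spec_check_typescript_lint_issues_py (content : String) (file_path : String) (out : List String) : Prop := out = check_typescript_lint_issues_py_alt content file_path
instance (content : String) (file_path : String) (out : List String) : Decidable (Spec_check_typescript_lint_issues_py content file_path out) := by unfold Spec_check_typescript_lint_issues_py; infer_instance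

-- ===== CLAIM (what is proved, stated in full; the proofs are below) =====
def Claim_equal_check_typescript_lint_issues_py : Prop := ∀ (content : String) (file_path : String), Dom_check_typescript_lint_issues_py content file_path → Spec_check_typescript_lint_issues_py content file_path (check_typescript_lint_issues_py content file_path)

-- ===== LEMMAS AND PROOFS =====

theorem pv_varName_eq (p : List Char) : pvA_varName p = pvB_varName p := rfl

-- proof-side name for A's per-line state transformer (defeq to the lambda in port A)
def pvAf (s : PySem.Set (List Char) × PySem.Set (List Char)) (line : List Char) :
    PySem.Set (List Char) × PySem.Set (List Char) :=
  (pvA_lineDecls line s.1, pvA_lineUses line (pvA_lineDecls line s.1) s.2)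

theorem pvAf_fst (s : PySem.Set (List Char) × PySem.Set (List Char)) (line : List Char) :
    (pvAf s line).1 = pvA_lineDecls line s.1 := rfl

theorem pvAf_snd (s : PySem.Set (List Char) × PySem.Set (List Char)) (line : List Char) :
    (pvAf s line).2 = pvA_lineUses line (pvA_lineDecls line s.1) s.2 := rfl

-- proof-side name for B's inner per-part dict step (defeq to the lambda in pvB_declLine)
def pvB_declStep (parts : List (List Char)) (t : Int) (d : PySem.Dict (List Char) Int)
    (ip : Int × List Char) : PySem.Dict (List Char) Int :=
  if ["let".toList, "const".toList, "var".toList].contains ip.2 && decide (ip.1 + 1 < (parts.length : Int)) then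
    let n := pvB_varName (PySem.List.pyGetD parts (ip.1 + 1) [])
    if d.contains n then d else d.insert n t
  else d

theorem pvB_declLine_eq (d : PySem.Dict (List Char) Int) (il : Int × List Char) :
    pvB_declLine d il =
      if (PySem.Chars.isIn " let ".toList il.2 || PySem.Chars.isIn " const ".toList il.2
          || PySem.Chars.isIn " var ".toList il.2) = true then
        (PySem.List.enumerate (PySem.Chars.split₀ il.2) 0).foldl (pvB_declStep (PySem.Chars.split₀ il.2) il.1) d
      else d := rfl

-- membership in a 'if p b: s.add(key(b))' fold
theorem pv_mem_foldl_addIf {α β : Type} [BEq α] [LawfulBEq α] (l : List β) (key : β → α)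
    (p : β → Bool) (uv : PySem.Set α) (v : α) :
    (v ∈ l.foldl (fun s b => if p b then PySem.Set.add s (key b) else s) uv) ↔
      v ∈ uv ∨ ∃ b ∈ l, key b = v ∧ p b = true := by
  induction l generalizing uv with
  | nil => simp
  | cons a l ih =>
    simp only [List.foldl_cons, ih, List.mem_cons]
    by_cases h : p a = true
    · rw [if_pos h]
      simp only [PySem.Set.mem_add]
      constructor
      · rintro ((hv | hv) | ⟨b, hb, hk, hp⟩)
        · exact Or.inl hv
        · exact Or.inr ⟨a, Or.inl rfl, hv.symm, h⟩
        · exact Or.inr ⟨b, Or.inr hb, hk, hp⟩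
      · rintro (hv | ⟨b, (rfl | hb), hk, hp⟩)
        · exact Or.inl (Or.inl hv)
        · exact Or.inl (Or.inr hk.symm)
        · exact Or.inr ⟨b, hb, hk, hp⟩
    · rw [if_neg h]
      constructor
      · rintro (hv | ⟨b, hb, hk, hp⟩)
        · exact Or.inl hv
        · exact Or.inr ⟨b, Or.inr hb, hk, hp⟩
      · rintro (hv | ⟨b, (rfl | hb), hk, hp⟩)
        · exact Or.inl hv
        · exact absurd hp h
        · exact Or.inr ⟨b, hb, hk, hp⟩

theorem pv_mem_lineUses (line : List Char) (dv uv : PySem.Set (List Char)) (v : List Char) :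
    v ∈ pvA_lineUses line dv uv ↔ v ∈ uv ∨ (v ∈ dv ∧ pvB_uses v line = true) := by
  have h : (v ∈ pvA_lineUses line dv uv) ↔
      v ∈ uv ∨ ∃ b ∈ dv, b = v ∧ pvB_uses b line = true :=
    pv_mem_foldl_addIf (l := dv) (key := fun w => w) (p := fun w => pvB_uses w line)
      (uv := uv) (v := v)
  rw [h]
  constructor
  · rintro (hv | ⟨b, hb, rfl, hp⟩)
    · exact Or.inl hv
    · exact Or.inr ⟨hb, hp⟩
  · rintro (hv | ⟨hb, hp⟩)
    · exact Or.inl hv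
    · exact Or.inr ⟨v, hb, rfl, hp⟩

-- A's declaration fold only adds elements
theorem pv_mem_declFold (parts : List (List Char)) (ps : List (Int × List Char))
    (dv : PySem.Set (List Char)) (v : List Char) (h : v ∈ dv) :
    v ∈ ps.foldl (pvA_declStep parts) dv := by
  induction ps generalizing dv with
  | nil => exact h
  | cons ip ps ih =>
    simp only [List.foldl_cons]
    apply ih
    unfold pvA_declStep
    split
    · exact (PySem.Set.mem_add _ _ _).mpr (Or.inl h)
    · exact h

theorem pv_mem_lineDecls (line : List Char) (dv : PySem.Set (List Char)) (v : List Char)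
    (h : v ∈ dv) : v ∈ pvA_lineDecls line dv := by
  unfold pvA_lineDecls
  split
  · exact pv_mem_declFold _ _ _ _ h
  · exact h

-- declaration sync between A's set fold and B's dict fold over the same parts
theorem pv_inner_sync (parts : List (List Char)) (t : Int) (ps : List (Int × List Char)) :
    ∀ d : PySem.Dict (List Char) Int, d.keys.Nodup →
      (ps.foldl (pvB_declStep parts t) d).keys = ps.foldl (pvA_declStep parts) d.keys
      ∧ (ps.foldl (pvB_declStep parts t) d).keys.Nodup
      ∧ ∀ v i, (ps.foldl (pvB_declStep parts t) d).get? v = some i →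
          d.get? v = some i ∨ (d.get? v = none ∧ i = t) := by
  induction ps with
  | nil => exact fun d hnd => ⟨rfl, hnd, fun v i h => Or.inl h⟩
  | cons ip ps ih =>
    intro d hnd
    simp only [List.foldl_cons]
    by_cases hg : (["let".toList, "const".toList, "var".toList].contains ip.2
        && decide (ip.1 + 1 < (parts.length : Int))) = true
    · by_cases hc : d.contains (pvB_varName (PySem.List.pyGetD parts (ip.1 + 1) [])) = true
      · have hB : pvB_declStep parts t d ip = d := by
          unfold pvB_declStep; rw [if_pos hg]; simp [hc]
        have hA : pvA_declStep parts d.keys ip = d.keys := by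
          unfold pvA_declStep; rw [if_pos hg, pv_varName_eq]
          exact PySem.Set.add_of_mem ((PySem.Dict.contains_iff_mem_keys _ _).mp hc)
        rw [hB, hA]; exact ih d hnd
      · have hcf : d.contains (pvB_varName (PySem.List.pyGetD parts (ip.1 + 1) [])) = false := by
          revert hc
          cases d.contains (pvB_varName (PySem.List.pyGetD parts (ip.1 + 1) [])) <;> simp
        have hnm : pvB_varName (PySem.List.pyGetD parts (ip.1 + 1) []) ∉ d.keys := by
          intro hm; exact hc ((PySem.Dict.contains_iff_mem_keys _ _).mpr hm)
        have hB : pvB_declStep parts t d ip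
            = d.insert (pvB_varName (PySem.List.pyGetD parts (ip.1 + 1) [])) t := by
          unfold pvB_declStep; rw [if_pos hg]; simp [hc]
        have hA : pvA_declStep parts d.keys ip
            = d.keys ++ [pvB_varName (PySem.List.pyGetD parts (ip.1 + 1) [])] := by
          unfold pvA_declStep; rw [if_pos hg, pv_varName_eq]
          exact PySem.Set.add_of_not_mem hnm
        have hkeys : (d.insert (pvB_varName (PySem.List.pyGetD parts (ip.1 + 1) [])) t).keys
            = d.keys ++ [pvB_varName (PySem.List.pyGetD parts (ip.1 + 1) [])] :=
          PySem.Dict.keys_insert_of_not_contains d t hcf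
        have hnd' : (d.insert (pvB_varName (PySem.List.pyGetD parts (ip.1 + 1) [])) t).keys.Nodup :=
          PySem.Dict.nodup_keys_insert _ _ _ hnd
        rw [hB, hA]
        obtain ⟨e1, e2, e3⟩ := ih _ hnd'
        refine ⟨by rw [e1, hkeys], e2, ?_⟩
        intro v i hv
        rcases e3 v i hv with h1 | ⟨h1, rfl⟩
        · rw [PySem.Dict.get?_insert] at h1
          by_cases hvn : v = pvB_varName (PySem.List.pyGetD parts (ip.1 + 1) [])
          · rw [if_pos hvn] at h1
            injection h1 with h2
            refine Or.inr ⟨?_, h2.symm⟩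
            rw [hvn]
            exact (PySem.Dict.get?_eq_none_iff_not_mem_keys _ _).mpr hnm
          · rw [if_neg hvn] at h1; exact Or.inl h1
        · rw [PySem.Dict.get?_insert] at h1
          by_cases hvn : v = pvB_varName (PySem.List.pyGetD parts (ip.1 + 1) [])
          · rw [if_pos hvn] at h1; exact absurd h1 (by simp)
          · rw [if_neg hvn] at h1; exact Or.inr ⟨h1, rfl⟩
    · have hB : pvB_declStep parts t d ip = d := by unfold pvB_declStep; rw [if_neg hg]
      have hA : pvA_declStep parts d.keys ip = d.keys := by unfold pvA_declStep; rw [if_neg hg]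
      rw [hB, hA]; exact ih d hnd

-- main invariant over the line scan
theorem pv_main_inv (lines : List (List Char)) :
    (lines.foldl pvAf (PySem.Set.empty, PySem.Set.empty)).1
        = ((PySem.List.enumerate lines 0).foldl pvB_declLine PySem.Dict.empty).keys
    ∧ ((PySem.List.enumerate lines 0).foldl pvB_declLine PySem.Dict.empty).keys.Nodup
    ∧ (∀ v ∈ (lines.foldl pvAf (PySem.Set.empty, PySem.Set.empty)).2,
        v ∈ (lines.foldl pvAf (PySem.Set.empty, PySem.Set.empty)).1)
    ∧ ∀ v i, ((PySem.List.enumerate lines 0).foldl pvB_declLine PySem.Dict.empty).get? v = some i →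
        0 ≤ i ∧ i.toNat ≤ lines.length ∧
        ((v ∈ (lines.foldl pvAf (PySem.Set.empty, PySem.Set.empty)).2)
          ↔ ((lines.drop i.toNat).any (pvB_uses v)) = true) := by
  induction lines using List.reverseRecOn with
  | nil =>
    refine ⟨?_, ?_, ?_, ?_⟩
    · rw [PySem.List.enumerate_nil]; rfl
    · rw [PySem.List.enumerate_nil]
      simp [PySem.Dict.keys_empty]
    · intro v hv; exact hv
    · intro v i h
      rw [PySem.List.enumerate_nil] at h
      simp only [List.foldl_nil, PySem.Dict.get?_empty] at h
      exact absurd h (by simp)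
  | append_singleton l x ih =>
    obtain ⟨ih1, ihnd, ihsub, ihchar⟩ := ih
    have hfold : (l ++ [x]).foldl pvAf (PySem.Set.empty, PySem.Set.empty)
        = pvAf (l.foldl pvAf (PySem.Set.empty, PySem.Set.empty)) x := by
      rw [List.foldl_append]; rfl
    have henum : PySem.List.enumerate (l ++ [x]) 0
        = PySem.List.enumerate l 0 ++ [((l.length : Int), x)] := by
      rw [PySem.List.enumerate_append, PySem.List.enumerate_cons, PySem.List.enumerate_nil]
      norm_num
    have hdict : (PySem.List.enumerate (l ++ [x]) 0).foldl pvB_declLine PySem.Dict.empty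
        = pvB_declLine ((PySem.List.enumerate l 0).foldl pvB_declLine PySem.Dict.empty)
            ((l.length : Int), x) := by
      rw [henum, List.foldl_append]; rfl
    set st := l.foldl pvAf (PySem.Set.empty, PySem.Set.empty) with hst
    set D := (PySem.List.enumerate l 0).foldl pvB_declLine PySem.Dict.empty with hD
    have hsync : pvA_lineDecls x st.1 = (pvB_declLine D ((l.length : Int), x)).keys
        ∧ (pvB_declLine D ((l.length : Int), x)).keys.Nodup
        ∧ ∀ v i, (pvB_declLine D ((l.length : Int), x)).get? v = some i →
            D.get? v = some i ∨ (D.get? v = none ∧ i = (l.length : Int)) := by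
      rw [pvB_declLine_eq]
      unfold pvA_lineDecls
      by_cases hg : (PySem.Chars.isIn " let ".toList x || PySem.Chars.isIn " const ".toList x
          || PySem.Chars.isIn " var ".toList x) = true
      · rw [if_pos hg, if_pos hg]
        obtain ⟨e1, e2, e3⟩ := pv_inner_sync (PySem.Chars.split₀ x) (l.length : Int)
          (PySem.List.enumerate (PySem.Chars.split₀ x) 0) D ihnd
        exact ⟨by rw [ih1, ← e1], e2, e3⟩
      · rw [if_neg hg, if_neg hg]
        exact ⟨ih1, ihnd, fun v i h => Or.inl h⟩
    obtain ⟨s1, s2, s3⟩ := hsync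
    rw [hfold, hdict]
    rw [pvAf_fst, pvAf_snd]
    refine ⟨s1, s2, ?_, ?_⟩
    · intro v hv
      rcases (pv_mem_lineUses x (pvA_lineDecls x st.1) st.2 v).mp hv with h1 | ⟨h1, _⟩
      · exact pv_mem_lineDecls x st.1 v (ihsub v h1)
      · exact h1
    · intro v i hgv
      rcases s3 v i hgv with hold | ⟨hnone, rfl⟩
      · obtain ⟨b1, b2, b3⟩ := ihchar v i hold
        refine ⟨b1, by simp only [List.length_append, List.length_cons, List.length_nil]; omega, ?_⟩
        have hvk : v ∈ D.keys := by
          by_contra hk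
          rw [(PySem.Dict.get?_eq_none_iff_not_mem_keys _ _).mpr hk] at hold
          exact absurd hold (by simp)
        have hvdv : v ∈ pvA_lineDecls x st.1 := pv_mem_lineDecls x st.1 v (ih1 ▸ hvk)
        rw [pv_mem_lineUses]
        have hdrop : (l ++ [x]).drop i.toNat = l.drop i.toNat ++ [x] :=
          List.drop_append_of_le_length b2
        rw [hdrop, List.any_append]
        simp only [List.any_cons, List.any_nil, Bool.or_false, Bool.or_eq_true]
        constructor
        · rintro (h1 | ⟨_, h2⟩)
          · exact Or.inl (b3.mp h1)
          · exact Or.inr h2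
        · rintro (h2 | h2)
          · exact Or.inl (b3.mpr h2)
          · exact Or.inr ⟨hvdv, h2⟩
      · refine ⟨Int.natCast_nonneg _, ?_, ?_⟩
        · rw [Int.toNat_natCast]
          simp only [List.length_append, List.length_cons, List.length_nil]
          omega
        · have hvnk : v ∉ D.keys := (PySem.Dict.get?_eq_none_iff_not_mem_keys _ _).mp hnone
          have hvnu : v ∉ st.2 := fun h => hvnk (ih1 ▸ ihsub v h)
          have hvdv : v ∈ pvA_lineDecls x st.1 := by
            rw [s1]
            by_contra hk
            rw [(PySem.Dict.get?_eq_none_iff_not_mem_keys _ _).mpr hk] at hgv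
            exact absurd hgv (by simp)
          rw [pv_mem_lineUses]
          have hdrop : (l ++ [x]).drop ((l.length : Int)).toNat = [x] := by
            rw [Int.toNat_natCast]
            exact List.drop_left
          rw [hdrop]
          simp only [List.any_cons, List.any_nil, Bool.or_false]
          constructor
          · rintro (h1 | ⟨_, h2⟩)
            · exact absurd h1 hvnu
            · exact h2
          · intro h1; exact Or.inr ⟨hvdv, h1⟩

-- the two result lists agree (list-level form of the whole claim)
theorem pv_top (lines : List (List Char)) (fp : List Char) :
    (PySem.Set.diff (lines.foldl pvAf (PySem.Set.empty, PySem.Set.empty)).1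
        (lines.foldl pvAf (PySem.Set.empty, PySem.Set.empty)).2).foldl
      (fun issues v => issues ++ [String.mk (fp ++ ": Unused variable '".toList ++ v ++ ['\''])]) []
    = (PySem.Set.diff ((PySem.List.enumerate lines 0).foldl pvB_declLine PySem.Dict.empty).keys
        (((PySem.List.enumerate lines 0).foldl pvB_declLine PySem.Dict.empty).items.foldl
          (fun uv p => if (PySem.List.slice lines (some p.2) none).any (pvB_uses p.1) then
              PySem.Set.add uv p.1 else uv)
          PySem.Set.empty)).map
        (fun v => String.mk (fp ++ ": Unused variable '".toList ++ v ++ ['\''])) := by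
  obtain ⟨h1, hnd, hsub, hchar⟩ := pv_main_inv lines
  set st := lines.foldl pvAf (PySem.Set.empty, PySem.Set.empty) with hst
  set D := (PySem.List.enumerate lines 0).foldl pvB_declLine PySem.Dict.empty with hD
  set used := D.items.foldl
    (fun uv p => if (PySem.List.slice lines (some p.2) none).any (pvB_uses p.1) then
        PySem.Set.add uv p.1 else uv) PySem.Set.empty with hused
  rw [PySem.List.foldl_append_singleton_eq_map, List.nil_append]
  congr 1
  rw [h1]
  unfold PySem.Set.diff
  apply List.filter_congr
  intro y hy
  cases hgy : D.get? y with
  | none =>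
    exact absurd hy ((PySem.Dict.get?_eq_none_iff_not_mem_keys _ _).mp hgy)
  | some i =>
    obtain ⟨b1, b2, b3⟩ := hchar y i hgy
    have h' : (y ∈ used) ↔ y ∈ (PySem.Set.empty : PySem.Set (List Char)) ∨
        ∃ b ∈ D.items, b.1 = y ∧
          ((PySem.List.slice lines (some b.2) none).any (pvB_uses b.1)) = true :=
      pv_mem_foldl_addIf (l := D.items) (key := Prod.fst)
        (p := fun q => (PySem.List.slice lines (some q.2) none).any (pvB_uses q.1))
        (uv := PySem.Set.empty) (v := y)
    have hmemused : (y ∈ used) ↔ ((lines.drop i.toNat).any (pvB_uses y)) = true := by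
      rw [h']
      constructor
      · rintro (hv | ⟨b, hb, hk, hp⟩)
        · exact absurd hv (by simp [PySem.Set.empty])
        · have hbg : D.get? b.1 = some b.2 := PySem.Dict.get?_of_mem_items D hb hnd
          rw [hk, hgy] at hbg
          injection hbg with hb2
          rw [hk, ← hb2, PySem.List.slice_from lines b1] at hp
          exact hp
      · intro hp
        refine Or.inr ⟨(y, i), PySem.Dict.mem_items_of_get?_eq_some D hgy, rfl, ?_⟩
        rw [PySem.List.slice_from lines b1]
        exact hp
    have hiff : (y ∈ st.2) ↔ (y ∈ used) := b3.trans hmemused.symm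
    have hcont : st.2.contains y = used.contains y := by
      rw [Bool.eq_iff_iff]
      constructor
      · intro h2
        exact (PySem.Set.contains_iff used y).mpr (hiff.mp ((PySem.Set.contains_iff st.2 y).mp h2))
      · intro h2
        exact (PySem.Set.contains_iff st.2 y).mpr (hiff.mpr ((PySem.Set.contains_iff used y).mp h2))
    show (!st.2.contains y) = (!used.contains y)
    rw [hcont]

-- ===== VERDICT (by name: the statement is the Claim_ definition above) =====
theorem check_typescript_lint_issues_py_spec : Claim_equal_check_typescript_lint_issues_py := by
  intro content file_path _
  show check_typescript_lint_issues_py content file_path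
      = check_typescript_lint_issues_py_alt content file_path
  exact pv_top (PySem.Chars.splitOn content.toList ['\n']) file_path.toList
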